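-- pv_equiv track=rewrite | github.com/LucasAFournier/predictris | src/predictris/plot.py | group_parameters
-- ===== SOURCE A (Python) =====
-- from typing import List, Dict
--
-- def extract_parameters(config_string: str) -> Dict[str, str]:
--     """Extract parameters and their values from config string."""
--     return dict(param.split('=', 1) for param in config_string.split('_') if '=' in param)
--
-- def group_parameters(configs: List[str]) -> tuple[Dict[str, str], Dict[str, bool]]:
--     """Group parameters into common and varying."""
--     all_params = [extract_parameters(config) for config in configs]
--     all_keys = set.union(*[set(p.keys()) for p in all_params])
--
--     common, varying = {}, {}
--     for key in all_keys:
--         values = {p.get(key) for p in all_params if key in p}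
--         if len(values) == 1:
--             common[key] = values.pop()
--         else:
--             varying[key] = True
--     return common, varying
-- ===== SOURCE B (Python) =====
-- def extract_parameters(config_string):
--     """Extract parameters and their values from config string."""
--     return dict(param.split('=', 1) for param in config_string.split('_') if '=' in param)
--
-- def group_parameters(configs):
--     """Group parameters into common and varying.
--
--     Single streaming pass: key -> (first value seen, varying flag), then split.
--     """
--     index = {}
--     for config in configs:
--         for k, v in extract_parameters(config).items():
--             if k not in index:
--                 index[k] = (v, False)
--             elif index[k][0] != v:
--                 index[k] = (index[k][0], True)
--     common = {k: val for k, (val, var) in index.items() if not var}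
--     varying = {k: True for k, (val, var) in index.items() if var}
--     return common, varying
-- ===== Notes on version B (the rewrite author's own statement) =====
-- stated objective: alternative
-- what changed: Replaces A's two-phase shape (collect all keys via set.union over per-config key sets, then rebuild a value set per key by rescanning every parsed config) with a single streaming pass that maintains key -> (first value, varying flag) and splits that index at the end; the per-key rescan and the per-key value sets disappear.
-- outside the precondition, e.g. on group_parameters([]): A raises TypeError, B returns ({}, {})
import Mathlib
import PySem

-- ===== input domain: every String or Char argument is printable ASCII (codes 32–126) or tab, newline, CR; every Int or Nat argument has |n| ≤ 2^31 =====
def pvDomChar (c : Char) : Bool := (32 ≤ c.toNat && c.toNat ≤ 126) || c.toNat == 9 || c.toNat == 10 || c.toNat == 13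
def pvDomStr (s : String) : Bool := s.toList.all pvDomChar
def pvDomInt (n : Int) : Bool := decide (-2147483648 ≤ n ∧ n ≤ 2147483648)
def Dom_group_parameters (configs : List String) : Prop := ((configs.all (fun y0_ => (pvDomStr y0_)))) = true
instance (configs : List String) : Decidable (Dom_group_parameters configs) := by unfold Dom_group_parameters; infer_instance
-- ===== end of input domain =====

-- B replaces A's two-phase shape (collect all keys via set.union, then rebuild a value set per key
-- by rescanning every parsed config) with one streaming pass keeping key -> (first value, varying flag),
-- split at the end (objective: alternative).

-- ===== PORT A =====
-- shared module helper extract_parameters, called by both Pythons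
def extract_parameters_port (config : String) : PySem.Dict String String :=
  ((PySem.Str.split? config "_").getD []).foldl (fun d param =>
    if PySem.Str.isIn "=" param then
      match PySem.Str.splitMax? param "=" 1 with
      | some (k :: v :: _) => d.insert k v
      | _ => d
    else d) PySem.Dict.empty

def group_parameters (configs : List String) : (List (String × String)) × (List (String × Bool)) :=
  let all_params := configs.map extract_parameters_port
  match all_params.map (fun p => (PySem.Set.ofList p.keys : PySem.Set String)) with
  | [] => ([], [])   -- Python raises TypeError here (set.union with no arguments); excluded by Pre_
  | s0 :: rest =>
    let all_keys : PySem.Set String := rest.foldl PySem.Set.union s0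
    let res := all_keys.foldl (fun (acc : PySem.Dict String String × PySem.Dict String Bool) key =>
        let values : PySem.Set String := all_params.foldl (fun s p =>
          match p.get? key with
          | some v => PySem.Set.add s v
          | none => s) PySem.Set.empty
        if values.length == 1 then (acc.1.insert key (values.headD ""), acc.2)
        else (acc.1, acc.2.insert key true))
      (PySem.Dict.empty, PySem.Dict.empty)
    (res.1.items, res.2.items)

-- ===== PORT B =====
def group_parameters_alt (configs : List String) : (List (String × String)) × (List (String × Bool)) :=
  let index : PySem.Dict String (String × Bool) :=
    configs.foldl (fun idx config =>
      (extract_parameters_port config).items.foldl (fun idx kv =>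
        match idx.get? kv.1 with
        | none => idx.insert kv.1 (kv.2, false)
        | some st => if st.1 ≠ kv.2 then idx.insert kv.1 (st.1, true) else idx) idx)
      PySem.Dict.empty
  (index.items.filterMap (fun p => if p.2.2 then none else some (p.1, p.2.1)),
   index.items.filterMap (fun p => if p.2.2 then some (p.1, true) else none))

-- ===== PRECONDITION & SPEC =====
-- Pre_ excludes only the empty list, on which the Python A raises TypeError in set.union(*[]).
def Pre_group_parameters (configs : List String) : Prop := configs ≠ []
instance (configs : List String) : Decidable (Pre_group_parameters configs) := by unfold Pre_group_parameters; infer_instance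
def pvWitness_group_parameters : List String := ["lr=1_bs=32", "lr=2_bs=32"]

def Spec_group_parameters (configs : List String) (out : (List (String × String)) × (List (String × Bool))) : Prop := out = group_parameters_alt configs
instance (configs : List String) (out : (List (String × String)) × (List (String × Bool))) : Decidable (Spec_group_parameters configs out) := by unfold Spec_group_parameters; infer_instance

-- ===== CLAIM (what is proved, stated in full; the proofs are below) =====
def Claim_equal_group_parameters : Prop := ∀ (configs : List String), Dom_group_parameters configs → Pre_group_parameters configs → Spec_group_parameters configs (group_parameters configs)

-- ===== LEMMAS AND PROOFS =====

-- the step of B's streaming loop, restated on the looked-up state only (proof-side helper)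
def pvStep (st : Option (String × Bool)) (v : String) : Option (String × Bool) :=
  match st with
  | none => some (v, false)
  | some st => if st.1 ≠ v then some (st.1, true) else some st

-- the list of values the parsed configs hold at `key`, in config order
def pvVals (ps : List (PySem.Dict String String)) (key : String) : List String :=
  ps.filterMap (fun p => p.get? key)

-- B's index, as a standalone definition (definitionally the index built inside group_parameters_alt)
def pvIndex (configs : List String) : PySem.Dict String (String × Bool) :=
  configs.foldl (fun idx config =>
      (extract_parameters_port config).items.foldl (fun idx kv =>
        match idx.get? kv.1 with
        | none => idx.insert kv.1 (kv.2, false)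
        | some st => if st.1 ≠ kv.2 then idx.insert kv.1 (st.1, true) else idx) idx)
    PySem.Dict.empty

-- all keys in first-appearance order
def pvAllKeys (ps : List (PySem.Dict String String)) : PySem.Set String :=
  ps.foldl (fun s p => PySem.Set.update s p.keys) ([] : PySem.Set String)

theorem nodup_keys_extract (s : String) : (extract_parameters_port s).keys.Nodup := by
  unfold extract_parameters_port
  generalize ((PySem.Str.split? s "_").getD []) = l
  have h : ∀ (l : List String) (d : PySem.Dict String String), d.keys.Nodup →
      (l.foldl (fun d param =>
        if PySem.Str.isIn "=" param then
          match PySem.Str.splitMax? param "=" 1 with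
          | some (k :: v :: _) => d.insert k v
          | _ => d
        else d) d).keys.Nodup := by
    intro l
    induction l with
    | nil => intro d hd; simpa using hd
    | cons x t ih =>
      intro d hd
      simp only [List.foldl_cons]
      apply ih
      split <;> (try split) <;>
        first
          | exact PySem.Dict.nodup_keys_insert _ _ _ hd
          | exact hd
  exact h l _ (by simp [PySem.Dict.keys, PySem.Dict.empty])

-- in a dict with distinct keys, filtering items at a key yields exactly the looked-up binding

theorem filter_items_eq (d : PySem.Dict String String) (key : String) (hd : d.keys.Nodup) :
    d.items.filter (fun kv => kv.1 == key)
      = (match d.get? key with | some v => [(key, v)] | none => []) := by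
  obtain ⟨l⟩ := d
  induction l with
  | nil => rfl
  | cons kv t ih =>
    simp only [PySem.Dict.keys, List.map_cons, List.nodup_cons] at hd
    have ht := ih hd.2
    by_cases h : kv.1 = key
    · subst h
      have hfil : t.filter (fun p => p.1 == kv.1) = [] := by
        rw [List.filter_eq_nil_iff]
        intro p hp
        simp only [beq_iff_eq]
        intro hpk
        exact hd.1 (hpk ▸ List.mem_map_of_mem hp)
      simp [PySem.Dict.get?, List.find?_cons_of_pos, hfil]
    · have hb : (kv.1 == key) = false := by simp [h]
      simpa [PySem.Dict.get?, List.filter_cons, hb, List.find?_cons_of_neg,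
        PySem.Dict.items] using ht

-- B's inner loop, looked up at `key`: only the items whose key is `key` act, via pvStep

theorem get?_inner_fold (l : List (String × String)) (idx : PySem.Dict String (String × Bool)) (key : String) :
    (l.foldl (fun idx kv =>
        match idx.get? kv.1 with
        | none => idx.insert kv.1 (kv.2, false)
        | some st => if st.1 ≠ kv.2 then idx.insert kv.1 (st.1, true) else idx) idx).get? key
      = (l.filter (fun kv => kv.1 == key)).foldl (fun st kv => pvStep st kv.2) (idx.get? key) := by
  induction l generalizing idx with
  | nil => rfl
  | cons kv t ih =>
    have hstep : ((match idx.get? kv.1 with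
          | none => idx.insert kv.1 (kv.2, false)
          | some st => if st.1 ≠ kv.2 then idx.insert kv.1 (st.1, true) else idx) : PySem.Dict String (String × Bool)).get? key
        = if kv.1 == key then pvStep (idx.get? key) kv.2 else idx.get? key := by
      by_cases hk : kv.1 = key
      · subst hk
        cases hg : idx.get? kv.1 with
        | none => simp [hg, pvStep, PySem.Dict.get?_insert_self]
        | some st =>
          by_cases hne : st.1 = kv.2
          · simp [hg, pvStep, hne]
          · simp [hg, pvStep, hne, PySem.Dict.get?_insert_self]
      · have hne : key ≠ kv.1 := fun h => hk h.symm
        cases hg : idx.get? kv.1 with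
        | none => simp [hg, hk, PySem.Dict.get?_insert, hne]
        | some st =>
          by_cases h2 : st.1 = kv.2
          · simp [hg, hk, h2]
          · simp [hg, hk, h2, PySem.Dict.get?_insert, hne]
    rw [List.foldl_cons, ih, hstep, List.filter_cons]
    by_cases hk : (kv.1 == key) = true
    · simp [hk]
    · simp [hk]

theorem keys_inner (l : List (String × String)) (idx : PySem.Dict String (String × Bool)) :
    (l.foldl (fun idx kv =>
        match idx.get? kv.1 with
        | none => idx.insert kv.1 (kv.2, false)
        | some st => if st.1 ≠ kv.2 then idx.insert kv.1 (st.1, true) else idx) idx).keys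
      = PySem.Set.update idx.keys (l.map (·.1)) := by
  induction l generalizing idx with
  | nil => simp [PySem.Set.update]
  | cons kv t ih =>
    have hstep : ((match idx.get? kv.1 with
          | none => idx.insert kv.1 (kv.2, false)
          | some st => if st.1 ≠ kv.2 then idx.insert kv.1 (st.1, true) else idx) : PySem.Dict String (String × Bool)).keys
        = PySem.Set.add idx.keys kv.1 := by
      cases hg : idx.get? kv.1 with
      | none =>
        have hnm : kv.1 ∉ idx.keys := (PySem.Dict.get?_eq_none_iff_not_mem_keys idx kv.1).mp hg
        have hc : idx.contains kv.1 = false := by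
          rw [PySem.Dict.contains_eq_isSome_get?, hg]; rfl
        simp [PySem.Dict.keys_insert_of_not_contains _ _ hc, PySem.Set.add_of_not_mem hnm]
      | some st =>
        have hm : kv.1 ∈ idx.keys := by
          by_contra hnm
          have h0 := (PySem.Dict.get?_eq_none_iff_not_mem_keys idx kv.1).mpr hnm
          rw [hg] at h0
          simp at h0
        have hc : idx.contains kv.1 = true := by
          rw [PySem.Dict.contains_eq_isSome_get?, hg]; rfl
        by_cases h2 : st.1 = kv.2
        · simp [h2, PySem.Set.add_of_mem hm]
        · simp [h2, PySem.Dict.keys_insert_of_contains _ _ hc, PySem.Set.add_of_mem hm]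
    rw [List.foldl_cons, ih, hstep, List.map_cons, PySem.Set.update_cons]

theorem get?_bIndex_gen (configs : List String) (idx : PySem.Dict String (String × Bool)) (key : String) :
    (configs.foldl (fun idx config =>
        (extract_parameters_port config).items.foldl (fun idx kv =>
          match idx.get? kv.1 with
          | none => idx.insert kv.1 (kv.2, false)
          | some st => if st.1 ≠ kv.2 then idx.insert kv.1 (st.1, true) else idx) idx)
      idx).get? key
    = (pvVals (configs.map extract_parameters_port) key).foldl (fun st v => pvStep st v) (idx.get? key) := by
  induction configs generalizing idx with
  | nil => rfl
  | cons c t ih =>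
    rw [List.foldl_cons, ih, get?_inner_fold,
      filter_items_eq _ key (nodup_keys_extract c)]
    simp only [List.map_cons, pvVals, List.filterMap_cons]
    cases hg : (extract_parameters_port c).get? key <;> simp [pvVals]

theorem update_ofList_right (s : PySem.Set String) (xs : List String) :
    PySem.Set.update s (PySem.Set.ofList xs) = PySem.Set.update s xs := by
  rw [PySem.Set.update_eq_append_filter, PySem.Set.update_eq_append_filter, PySem.Set.ofList_ofList]

theorem allKeys_A (p0 : PySem.Dict String String) (pt : List (PySem.Dict String String)) :
    (pt.map (fun p => (PySem.Set.ofList p.keys : PySem.Set String))).foldl PySem.Set.union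
        (PySem.Set.ofList p0.keys)
    = (p0 :: pt).foldl (fun s p => PySem.Set.update s p.keys) ([] : PySem.Set String) := by
  simp only [List.foldl_map, List.foldl_cons, PySem.Set.update_empty, PySem.Set.union,
    update_ofList_right]
  rfl

theorem aValues_gen (ps : List (PySem.Dict String String)) (key : String) (s : PySem.Set String) :
    ps.foldl (fun s p =>
        match p.get? key with
        | some v => PySem.Set.add s v
        | none => s) s
    = PySem.Set.update s (pvVals ps key) := by
  induction ps generalizing s with
  | nil => rfl
  | cons p t ih =>
    rw [List.foldl_cons]
    cases hg : p.get? key with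
    | none => simp only [hg, pvVals, List.filterMap_cons, hg]; exact ih s
    | some v =>
      simp only [hg, pvVals, List.filterMap_cons]
      rw [PySem.Set.update_cons]
      exact ih _

theorem aValues_eq (ps : List (PySem.Dict String String)) (key : String) :
    ps.foldl (fun s p =>
        match p.get? key with
        | some v => PySem.Set.add s v
        | none => s) (PySem.Set.empty : PySem.Set String)
    = PySem.Set.ofList (pvVals ps key) := by
  rw [aValues_gen]; rfl

theorem pvStep_foldl (v0 : String) (b : Bool) (vs : List String) :
    vs.foldl (fun st v => pvStep st v) (some (v0, b)) = some (v0, b || vs.any (fun w => v0 ≠ w)) := by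
  induction vs generalizing b with
  | nil => simp
  | cons w t ih =>
    rw [List.foldl_cons]
    by_cases h : v0 = w
    · have hs : pvStep (some (v0, b)) w = some (v0, b) := by simp [pvStep, h]
      rw [hs, ih, List.any_cons]
      simp [h]
    · have hs : pvStep (some (v0, b)) w = some (v0, true) := by simp [pvStep, h]
      rw [hs, ih, List.any_cons]
      simp [h]

-- keys of B's index = all keys in first-appearance order

theorem nodup_allKeys (ps : List (PySem.Dict String String)) (s : PySem.Set String) (hs : s.Nodup) :
    (ps.foldl (fun s p => PySem.Set.update s p.keys) s).Nodup := by
  induction ps generalizing s with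
  | nil => exact hs
  | cons p t ih => exact ih _ (PySem.Set.nodup_update _ _ hs)

-- membership in the key set = some config holds the key = pvVals nonempty

theorem mem_allKeys (ps : List (PySem.Dict String String)) (s : PySem.Set String) (key : String) :
    key ∈ ps.foldl (fun s p => PySem.Set.update s p.keys) s ↔ key ∈ s ∨ ∃ p ∈ ps, key ∈ p.keys := by
  induction ps generalizing s with
  | nil => simp
  | cons p t ih => simp [ih, PySem.Set.mem_update]; tauto

-- A's final loop over distinct fresh keys: the two dicts' items written out

theorem final_fold_A (K : List String) (P : String → Bool) (f : String → String)
    (d1 : PySem.Dict String String) (d2 : PySem.Dict String Bool)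
    (hnd : K.Nodup) (h1 : ∀ k ∈ K, k ∉ d1.keys) (h2 : ∀ k ∈ K, k ∉ d2.keys) :
    (K.foldl (fun (acc : PySem.Dict String String × PySem.Dict String Bool) key =>
        if P key then (acc.1.insert key (f key), acc.2)
        else (acc.1, acc.2.insert key true)) (d1, d2))
    = (⟨d1.items ++ (K.filter P).map (fun k => (k, f k))⟩,
       ⟨d2.items ++ (K.filter (fun k => !P k)).map (fun k => (k, true))⟩) := by
  induction K generalizing d1 d2 with
  | nil =>
    simp only [List.filter_nil, List.map_nil, List.append_nil, List.foldl_nil]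
  | cons k t ih =>
    simp only [List.nodup_cons] at hnd
    rw [List.foldl_cons, List.filter_cons, List.filter_cons]
    by_cases hP : P k
    · have hc1 : d1.contains k = false := by
        have := h1 k List.mem_cons_self
        rw [← Bool.not_eq_true, PySem.Dict.contains_iff_mem_keys]; exact this
      have hkeys := PySem.Dict.keys_insert_of_not_contains d1 (f k) hc1
      rw [if_pos hP]
      rw [ih (d1.insert k (f k)) d2 hnd.2
        (fun k' hk' => by
          rw [hkeys]
          simp only [List.mem_append, List.mem_singleton]
          rintro (h | h)
          · exact h1 k' (List.mem_cons_of_mem _ hk') h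
          · exact hnd.1 (h ▸ hk'))
        (fun k' hk' => h2 k' (List.mem_cons_of_mem _ hk'))]
      rw [PySem.Dict.items_insert_of_not_contains _ _ hc1]
      simp [hP, List.append_assoc]
    · have hc2 : d2.contains k = false := by
        have := h2 k List.mem_cons_self
        rw [← Bool.not_eq_true, PySem.Dict.contains_iff_mem_keys]; exact this
      have hkeys := PySem.Dict.keys_insert_of_not_contains d2 true hc2
      rw [if_neg hP]
      rw [ih d1 (d2.insert k true) hnd.2
        (fun k' hk' => h1 k' (List.mem_cons_of_mem _ hk'))
        (fun k' hk' => by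
          rw [hkeys]
          simp only [List.mem_append, List.mem_singleton]
          rintro (h | h)
          · exact h2 k' (List.mem_cons_of_mem _ hk') h
          · exact hnd.1 (h ▸ hk'))]
      rw [PySem.Dict.items_insert_of_not_contains _ _ hc2]
      simp [hP, List.append_assoc]

theorem pvAllKeys_eq (ps : List (PySem.Dict String String)) :
    List.foldl (fun s p => PySem.Set.update s p.keys) ([] : PySem.Set String) ps = pvAllKeys ps := rfl

theorem filterMap_split1 (K : List String) (G : String → String × Bool) :
    (K.map (fun k => (k, G k))).filterMap (fun p => if p.2.2 then none else some (p.1, p.2.1))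
      = (K.filter (fun k => !(G k).2)).map (fun k => (k, (G k).1)) := by
  induction K with
  | nil => rfl
  | cons k t ih => cases h : (G k).2 <;> simp [h, ih]

theorem filterMap_split2 (K : List String) (G : String → String × Bool) :
    (K.map (fun k => (k, G k))).filterMap (fun p => if p.2.2 then some (p.1, true) else none)
      = (K.filter (fun k => (G k).2)).map (fun k => (k, (true : Bool))) := by
  induction K with
  | nil => rfl
  | cons k t ih => cases h : (G k).2 <;> simp [h, ih]

theorem card_ofList_cons (v : String) (vs : List String) :
    (((PySem.Set.ofList (v :: vs) : PySem.Set String)).length == 1)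
      = !(vs.any (fun w => v ≠ w)) := by
  rw [PySem.Set.ofList_cons]
  by_cases h : vs.any (fun w => decide (v ≠ w)) = true
  · obtain ⟨w, hw, hne⟩ := List.any_eq_true.mp h
    have hvw : v ≠ w := by simpa using hne
    have hwmem : w ∈ PySem.Set.discard (PySem.Set.ofList vs) v := by
      rw [PySem.Set.mem_discard]
      exact ⟨(PySem.Set.mem_ofList _ _).mpr hw, Ne.symm hvw⟩
    have hlen : 0 < (PySem.Set.discard (PySem.Set.ofList vs) v).length :=
      List.length_pos_of_mem hwmem
    have hnil := List.ne_nil_of_mem hwmem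
    have h' : (vs.any fun w => !decide (v = w)) = true := by simpa [decide_not] using h
    simp [h', hnil]
  · have hall : ∀ w ∈ vs, w = v := by
      intro w hw
      by_contra hne
      exact h (List.any_eq_true.mpr ⟨w, hw, by simpa using fun hh => hne hh.symm⟩)
    have hdis : PySem.Set.discard (PySem.Set.ofList vs) v = [] := by
      rw [List.eq_nil_iff_forall_not_mem]
      intro w hw
      rw [PySem.Set.mem_discard] at hw
      exact hw.2 (hall w ((PySem.Set.mem_ofList _ _).mp hw.1))
    simp only [hdis, h]
    simp only [List.any_eq_true, decide_eq_true_eq, not_exists, not_and, not_not] at h ⊢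
    simpa using fun x hx => (hall x hx).symm

theorem keys_bIndex (configs : List String) (idx : PySem.Dict String (String × Bool)) :
    (configs.foldl (fun idx config =>
        (extract_parameters_port config).items.foldl (fun idx kv =>
          match idx.get? kv.1 with
          | none => idx.insert kv.1 (kv.2, false)
          | some st => if st.1 ≠ kv.2 then idx.insert kv.1 (st.1, true) else idx) idx)
      idx).keys
    = (configs.map extract_parameters_port).foldl (fun s p => PySem.Set.update s p.keys) idx.keys := by
  induction configs generalizing idx with
  | nil => rfl
  | cons c t ih =>
    rw [List.foldl_cons, ih, keys_inner, List.map_cons, List.foldl_cons]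
    rfl

theorem main_eq (c : String) (cs : List String) :
    group_parameters (c :: cs) = group_parameters_alt (c :: cs) := by
  have hK : (pvIndex (c :: cs)).keys
      = pvAllKeys ((c :: cs).map extract_parameters_port) := by
    have := keys_bIndex (c :: cs) PySem.Dict.empty
    simpa [pvIndex, pvAllKeys, PySem.Dict.keys, PySem.Dict.empty] using this
  have hndK : (pvAllKeys ((c :: cs).map extract_parameters_port)).Nodup :=
    nodup_allKeys _ _ List.nodup_nil
  -- characterize B's lookups on keys of the set
  have hget : ∀ k ∈ pvAllKeys ((c :: cs).map extract_parameters_port),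
      ∃ v vs, pvVals ((c :: cs).map extract_parameters_port) k = v :: vs ∧
        (pvIndex (c :: cs)).getD k ("", false) = (v, vs.any (fun w => v ≠ w)) := by
    intro k hk
    have hmem := (mem_allKeys _ _ k).mp hk
    simp only [List.mem_nil_iff, false_or] at hmem
    obtain ⟨p, hp, hkp⟩ := hmem
    have hvne : pvVals ((c :: cs).map extract_parameters_port) k ≠ [] := by
      intro hnil
      rw [pvVals, List.filterMap_eq_nil_iff] at hnil
      have := hnil p hp
      rw [PySem.Dict.get?_eq_none_iff_not_mem_keys] at this
      exact this hkp
    obtain ⟨v, vs, hvv⟩ := List.exists_cons_of_ne_nil hvne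
    refine ⟨v, vs, hvv, ?_⟩
    have hg : (pvIndex (c :: cs)).get? k = some (v, vs.any (fun w => v ≠ w)) := by
      have h1 : (pvIndex (c :: cs)).get? k
          = (pvVals ((c :: cs).map extract_parameters_port) k).foldl
              (fun st v => pvStep st v) none :=
        get?_bIndex_gen (c :: cs) PySem.Dict.empty k
      rw [h1, hvv, List.foldl_cons]
      exact pvStep_foldl v false vs
    rw [PySem.Dict.getD_eq_get?_getD, hg]
    rfl
  -- reduce A
  have hA : group_parameters (c :: cs)
      = (((pvAllKeys ((c :: cs).map extract_parameters_port)).filter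
            (fun k => (PySem.Set.ofList (pvVals ((c :: cs).map extract_parameters_port) k)).length == 1)).map
            (fun k => (k, (PySem.Set.ofList (pvVals ((c :: cs).map extract_parameters_port) k)).headD "")),
         ((pvAllKeys ((c :: cs).map extract_parameters_port)).filter
            (fun k => !((PySem.Set.ofList (pvVals ((c :: cs).map extract_parameters_port) k)).length == 1))).map
            (fun k => (k, true))) := by
    simp only [group_parameters, List.map_cons]
    rw [allKeys_A, pvAllKeys_eq]
    simp only [aValues_eq]
    have hndK2 : (pvAllKeys (extract_parameters_port c :: cs.map extract_parameters_port)).Nodup := by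
      simpa using hndK
    rw [final_fold_A _ _ _ _ _ hndK2
      (fun k _ hmem => List.not_mem_nil hmem)
      (fun k _ hmem => List.not_mem_nil hmem)]
    simp [PySem.Dict.items, PySem.Dict.empty]
  -- reduce B
  have hB : group_parameters_alt (c :: cs)
      = (((pvAllKeys ((c :: cs).map extract_parameters_port)).filter
            (fun k => !((pvIndex (c :: cs)).getD k ("", false)).2)).map
            (fun k => (k, ((pvIndex (c :: cs)).getD k ("", false)).1)),
         ((pvAllKeys ((c :: cs).map extract_parameters_port)).filter
            (fun k => ((pvIndex (c :: cs)).getD k ("", false)).2)).map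
            (fun k => (k, true))) := by
    have hnd' : (pvIndex (c :: cs)).keys.Nodup := hK ▸ hndK
    have hitems : (pvIndex (c :: cs)).items
        = (pvAllKeys ((c :: cs).map extract_parameters_port)).map
            (fun k => (k, (pvIndex (c :: cs)).getD k ("", false))) := by
      rw [PySem.Dict.items_eq_map_keys _ hnd' ("", false), hK]
    show ((pvIndex (c :: cs)).items.filterMap (fun p => if p.2.2 then none else some (p.1, p.2.1)),
          (pvIndex (c :: cs)).items.filterMap (fun p => if p.2.2 then some (p.1, true) else none)) = _
    rw [hitems, filterMap_split1, filterMap_split2]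
  simp only [List.map_cons] at hA hB hget
  rw [hA, hB]
  have hPpt : ∀ k ∈ pvAllKeys (extract_parameters_port c :: cs.map extract_parameters_port),
      ((PySem.Set.ofList (pvVals (extract_parameters_port c :: cs.map extract_parameters_port) k)).length == 1)
        = !((pvIndex (c :: cs)).getD k ("", false)).2 := by
    intro k hk
    obtain ⟨v, vs, hvv, hgd⟩ := hget k hk
    rw [hvv, hgd, card_ofList_cons]
  have hFpt : ∀ k ∈ pvAllKeys (extract_parameters_port c :: cs.map extract_parameters_port),
      (PySem.Set.ofList (pvVals (extract_parameters_port c :: cs.map extract_parameters_port) k)).headD ""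
        = ((pvIndex (c :: cs)).getD k ("", false)).1 := by
    intro k hk
    obtain ⟨v, vs, hvv, hgd⟩ := hget k hk
    rw [hvv, hgd, PySem.Set.ofList_cons]
    rfl
  have e1 : List.filter
        (fun k => (PySem.Set.ofList (pvVals (extract_parameters_port c :: cs.map extract_parameters_port) k)).length == 1)
        (pvAllKeys (extract_parameters_port c :: cs.map extract_parameters_port))
      = List.filter (fun k => !((pvIndex (c :: cs)).getD k ("", false)).2)
        (pvAllKeys (extract_parameters_port c :: cs.map extract_parameters_port)) :=
    List.filter_congr hPpt
  have e2 : List.filter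
        (fun k => !((PySem.Set.ofList (pvVals (extract_parameters_port c :: cs.map extract_parameters_port) k)).length == 1))
        (pvAllKeys (extract_parameters_port c :: cs.map extract_parameters_port))
      = List.filter (fun k => ((pvIndex (c :: cs)).getD k ("", false)).2)
        (pvAllKeys (extract_parameters_port c :: cs.map extract_parameters_port)) :=
    List.filter_congr (fun k hk => by simp [hPpt k hk])
  have e3 : List.map
        (fun k => (k, (PySem.Set.ofList (pvVals (extract_parameters_port c :: cs.map extract_parameters_port) k)).headD ""))
        (List.filter (fun k => !((pvIndex (c :: cs)).getD k ("", false)).2)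
          (pvAllKeys (extract_parameters_port c :: cs.map extract_parameters_port)))
      = List.map (fun k => (k, ((pvIndex (c :: cs)).getD k ("", false)).1))
        (List.filter (fun k => !((pvIndex (c :: cs)).getD k ("", false)).2)
          (pvAllKeys (extract_parameters_port c :: cs.map extract_parameters_port))) :=
    List.map_congr_left (fun k hk => by rw [hFpt k (List.mem_of_mem_filter hk)])
  rw [e1, e3, e2]

-- ===== VERDICT (by name: the statement is the Claim_ definition above) =====
theorem group_parameters_spec : Claim_equal_group_parameters := by
  intro configs _ hpre
  unfold Spec_group_parameters
  cases configs with
  | nil => exact absurd rfl hpre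
  | cons c cs => exact main_eq c cs
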